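-- pv_equiv track=rewrite | github.com/wheaties/us-geographies | parsers/pdf.py | _index_empty_columns
-- ===== SOURCE A (Python) =====
-- def _index_empty_columns(tables):
--     columns = len(tables[0][0])
--     matrix = {}
--     for idx in range(columns):
--         matrix[idx] = False
--         for table in tables:
--             matrix[idx] |= any(row[idx] for row in table)
--     return [idx for idx in matrix if not matrix[idx]]
-- ===== SOURCE B (Python) =====
-- def _index_empty_columns(tables):
--     candidates = list(range(len(tables[0][0])))
--     for table in tables:
--         for row in table:
--             if not candidates:
--                 return []
--             candidates = [idx for idx in candidates if not row[idx]]
--     return candidates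
-- ===== Notes on version B (the rewrite author's own statement) =====
-- stated objective: alternative
-- what changed: Replaces A's mark-everything scheme (a dict of per-column booleans filled by scanning every column over every row) with a shrinking candidate-set algorithm: start with all column indices, prune each row's non-empty indices from the surviving candidates, and return early once none survive.
import Mathlib
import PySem

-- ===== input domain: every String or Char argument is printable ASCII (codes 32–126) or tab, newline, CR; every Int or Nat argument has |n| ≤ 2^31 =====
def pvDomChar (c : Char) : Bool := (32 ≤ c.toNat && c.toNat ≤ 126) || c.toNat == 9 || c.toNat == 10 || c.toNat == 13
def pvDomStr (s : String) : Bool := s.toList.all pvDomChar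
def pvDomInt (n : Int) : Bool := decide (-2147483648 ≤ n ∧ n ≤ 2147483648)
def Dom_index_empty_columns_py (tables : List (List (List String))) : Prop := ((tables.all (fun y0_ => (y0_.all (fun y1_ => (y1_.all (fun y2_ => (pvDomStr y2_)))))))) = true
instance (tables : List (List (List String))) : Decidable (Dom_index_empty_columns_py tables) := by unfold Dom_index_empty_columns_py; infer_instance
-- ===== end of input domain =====

-- B replaces A's per-column marking scans with a shrinking candidate-set algorithm that
-- prunes each row's non-empty indices from the surviving candidates (objective: alternative).

-- ===== PORT A =====
-- truthiness of a cell: Python's `if row[idx]` / generator `row[idx]` (non-empty string)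
def pvCell (row : List String) (idx : Int) : Bool :=
  decide (((PySem.List.pyGet? row idx).getD "") ≠ "")

-- any(row[idx] for row in table)
def pvAnyRow (table : List (List String)) (idx : Int) : Bool :=
  table.any (fun row => pvCell row idx)

def index_empty_columns_py (tables : List (List (List String))) : List Int :=
  let columns : Int := (((tables.headD []).headD []).length : Int)
  let matrix : PySem.Dict Int Bool :=
    (PySem.List.pyRange 0 columns 1).foldl
      (fun m idx =>
        tables.foldl (fun m table => m.insert idx (m.getD idx false || pvAnyRow table idx))
          (m.insert idx false))
      PySem.Dict.empty
  matrix.keys.filter (fun idx => !(matrix.getD idx false))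

-- ===== PORT B =====
-- inner row loop of B: `if not candidates: return []` then prune the row's non-empty indices
def pvPrune : List (List String) → List Int → List Int
  | [], cand => cand
  | row :: rows, cand =>
      if cand = [] then [] else pvPrune rows (cand.filter (fun idx => !(pvCell row idx)))

-- outer table loop of B
def pvPruneTables : List (List (List String)) → List Int → List Int
  | [], cand => cand
  | t :: ts, cand => pvPruneTables ts (pvPrune t cand)

def index_empty_columns_py_alt (tables : List (List (List String))) : List Int :=
  let columns : Int := (((tables.headD []).headD []).length : Int)
  pvPruneTables tables (PySem.List.pyRange 0 columns 1)

-- ===== PRECONDITION & SPEC =====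
-- Pre_ excludes exactly the inputs on which Python A raises IndexError: empty `tables` or
-- an empty first table (len(tables[0][0]) fails), and ragged inputs where, at some column
-- index, a too-short row of some table is reached before any earlier row of that table has
-- a non-empty cell at that index (the short-circuiting `any` then evaluates row[idx] there).
def Pre_index_empty_columns_py (tables : List (List (List String))) : Prop :=
  tables ≠ [] ∧ tables.headD [] ≠ [] ∧
    ∀ idx < ((tables.headD []).headD []).length, ∀ table ∈ tables, ∀ k < table.length,
      (table.getD k []).length ≤ idx →
        ∃ j < k, idx < (table.getD j []).length ∧ (table.getD j []).getD idx "" ≠ ""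
instance (tables : List (List (List String))) : Decidable (Pre_index_empty_columns_py tables) := by
  unfold Pre_index_empty_columns_py; infer_instance

def pvWitness_index_empty_columns_py : List (List (List String)) :=
  [[["a", ""], ["", ""]], [["b", ""]]]

def Spec_index_empty_columns_py (tables : List (List (List String))) (out : List Int) : Prop := out = index_empty_columns_py_alt tables
instance (tables : List (List (List String))) (out : List Int) : Decidable (Spec_index_empty_columns_py tables out) := by unfold Spec_index_empty_columns_py; infer_instance

-- ===== CLAIM (what is proved, stated in full; the proofs are below) =====
def Claim_equal_index_empty_columns_py : Prop := ∀ (tables : List (List (List String))), Dom_index_empty_columns_py tables → Pre_index_empty_columns_py tables → Spec_index_empty_columns_py tables (index_empty_columns_py tables)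

-- ===== LEMMAS AND PROOFS =====

-- the column predicate both ports decide: some cell of some table at this index is truthy
def pvF (tables : List (List (List String))) (idx : Int) : Bool :=
  tables.any (fun table => pvAnyRow table idx)

-- A side, inner fold over tables at a fixed key idx
theorem pvA_inner_getD (tables : List (List (List String))) (idx : Int)
    (m : PySem.Dict Int Bool) (b : Bool) :
    (tables.foldl (fun m table => m.insert idx (m.getD idx false || pvAnyRow table idx))
        (m.insert idx b)).getD idx false = (b || pvF tables idx) := by
  induction tables generalizing m b with
  | nil => simp [pvF, PySem.Dict.getD_insert_self]
  | cons t ts ih =>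
    simp only [List.foldl_cons, PySem.Dict.getD_insert_self]
    rw [ih (m.insert idx b) (b || pvAnyRow t idx)]
    simp [pvF, Bool.or_assoc]

theorem pvA_inner_getD_ne (tables : List (List (List String))) (idx j : Int) (hj : j ≠ idx)
    (m : PySem.Dict Int Bool) (b : Bool) :
    (tables.foldl (fun m table => m.insert idx (m.getD idx false || pvAnyRow table idx))
        (m.insert idx b)).getD j false = m.getD j false := by
  induction tables generalizing m b with
  | nil => exact PySem.Dict.getD_insert_of_ne _ _ _ hj
  | cons t ts ih =>
    simp only [List.foldl_cons, PySem.Dict.getD_insert_self]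
    rw [ih (m.insert idx b) (b || pvAnyRow t idx)]
    exact PySem.Dict.getD_insert_of_ne _ _ _ hj

theorem pvA_inner_keys (tables : List (List (List String))) (idx : Int)
    (m : PySem.Dict Int Bool) (b : Bool) :
    (tables.foldl (fun m table => m.insert idx (m.getD idx false || pvAnyRow table idx))
        (m.insert idx b)).keys = (m.insert idx b).keys := by
  induction tables generalizing m b with
  | nil => rfl
  | cons t ts ih =>
    simp only [List.foldl_cons, PySem.Dict.getD_insert_self]
    rw [ih (m.insert idx b) (b || pvAnyRow t idx),
        PySem.Dict.keys_insert_of_contains _ _ (PySem.Dict.contains_insert_self _ _ _)]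

-- A side, outer fold over the index list
theorem pvA_outer (tables : List (List (List String))) (l : List Int)
    (m : PySem.Dict Int Bool) (hnd : l.Nodup) (hfresh : ∀ i ∈ l, m.contains i = false) :
    (l.foldl
        (fun m idx =>
          tables.foldl (fun m table => m.insert idx (m.getD idx false || pvAnyRow table idx))
            (m.insert idx false)) m).keys = m.keys ++ l ∧
    ∀ j : Int,
      (l.foldl
          (fun m idx =>
            tables.foldl (fun m table => m.insert idx (m.getD idx false || pvAnyRow table idx))
              (m.insert idx false)) m).getD j false =
        if j ∈ l then pvF tables j else m.getD j false := by
  induction l generalizing m with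
  | nil => simp
  | cons i l ih =>
    obtain ⟨hil, hnd'⟩ := List.nodup_cons.mp hnd
    simp only [List.foldl_cons]
    set m1 := tables.foldl (fun m table => m.insert i (m.getD i false || pvAnyRow table i))
        (m.insert i false) with hm1
    have hk1 : m1.keys = m.keys ++ [i] := by
      rw [hm1, pvA_inner_keys, PySem.Dict.keys_insert_of_not_contains]
      exact hfresh i (by simp)
    have hfresh1 : ∀ x ∈ l, m1.contains x = false := by
      intro x hx
      have hxi : x ≠ i := fun h => hil (h ▸ hx)
      rw [← Bool.not_eq_true, PySem.Dict.contains_iff_mem_keys, hk1]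
      intro hmem
      rcases List.mem_append.mp hmem with h | h
      · exact absurd ((PySem.Dict.contains_iff_mem_keys _ _).mpr h)
          (by simp [hfresh x (by simp [hx])])
      · exact hxi (by simpa using h)
    obtain ⟨hkeys, hgetD⟩ := ih m1 hnd' hfresh1
    constructor
    · rw [hkeys, hk1]; simp
    · intro j
      rw [hgetD j]
      by_cases hjl : j ∈ l
      · simp [hjl]
      · by_cases hji : j = i
        · subst hji
          simp [hjl, hm1, pvA_inner_getD]
        · simp [hjl, hji, hm1, pvA_inner_getD_ne tables i j hji]

-- B side: pruning a table's rows is filtering by "empty in every row"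
theorem pvPrune_eq (rows : List (List String)) (cand : List Int) :
    pvPrune rows cand = cand.filter (fun i => rows.all (fun r => !(pvCell r i))) := by
  induction rows generalizing cand with
  | nil => simp [pvPrune]
  | cons r rs ih =>
    by_cases hc : cand = []
    · subst hc; simp [pvPrune]
    · rw [pvPrune, if_neg hc, ih, List.filter_filter]
      apply List.filter_congr
      intro i _
      simp [Bool.and_comm]

-- B side: pruning all tables filters by "empty everywhere"
theorem pvPruneTables_eq (tables : List (List (List String))) (cand : List Int) :
    pvPruneTables tables cand =
      cand.filter (fun i => tables.all (fun t => t.all (fun r => !(pvCell r i)))) := by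
  induction tables generalizing cand with
  | nil => simp [pvPruneTables]
  | cons t ts ih =>
    rw [pvPruneTables, ih, pvPrune_eq, List.filter_filter]
    apply List.filter_congr
    intro i _
    simp [Bool.and_comm]

-- ===== VERDICT (by name: the statement is the Claim_ definition above) =====
theorem index_empty_columns_py_spec : Claim_equal_index_empty_columns_py := by
  intro tables _ _
  unfold Spec_index_empty_columns_py index_empty_columns_py index_empty_columns_py_alt
  simp only []
  set columns : Int := (((tables.headD []).headD []).length : Int) with hcols
  set l := PySem.List.pyRange 0 columns 1 with hl
  obtain ⟨hkeys, hgetD⟩ := pvA_outer tables l PySem.Dict.empty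
    (hl ▸ PySem.List.nodup_pyRange_one 0 columns) (by simp)
  rw [hkeys, pvPruneTables_eq]
  simp only [PySem.Dict.keys_empty, List.nil_append]
  apply List.filter_congr
  intro i hi
  rw [hgetD i]
  simp only [hi, if_pos]
  simp [pvF, pvAnyRow, List.any_eq_not_all_not]
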